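-- pv_equiv track=rewrite | github.com/rahulgupta2018/ai-code-review-multi-agent | src/agents/base/tools/report_generator.py | _categorize_findings_by_file
-- ===== SOURCE A (Python) =====
-- from typing import Dict, List, Any, Optional
--
-- def _categorize_findings_by_file(findings: List[Dict]) -> Dict[str, List[Dict]]:
--     """Categorize findings by file"""
--     by_file = {}
--
--     for finding in findings:
--         file_path = finding.get('file', 'unknown')
--         if file_path not in by_file:
--             by_file[file_path] = []
--         by_file[file_path].append(finding)
--
--     return by_file
-- ===== SOURCE B (Python) =====
-- def _categorize_findings_by_file(findings):
--     """Categorize findings by file"""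
--     order = []
--     for finding in findings:
--         k = finding.get('file', 'unknown')
--         if k not in order:
--             order.append(k)
--     return {k: [f for f in findings if f.get('file', 'unknown') == k] for k in order}
-- ===== Notes on version B (the rewrite author's own statement) =====
-- stated objective: alternative
-- what changed: Replaces the single-pass hash accumulation (create-bucket-then-append per finding) by a two-phase scheme: first collect the distinct file keys in first-occurrence order, then build the result as a comprehension that filters the findings list once per key.
import Mathlib
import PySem

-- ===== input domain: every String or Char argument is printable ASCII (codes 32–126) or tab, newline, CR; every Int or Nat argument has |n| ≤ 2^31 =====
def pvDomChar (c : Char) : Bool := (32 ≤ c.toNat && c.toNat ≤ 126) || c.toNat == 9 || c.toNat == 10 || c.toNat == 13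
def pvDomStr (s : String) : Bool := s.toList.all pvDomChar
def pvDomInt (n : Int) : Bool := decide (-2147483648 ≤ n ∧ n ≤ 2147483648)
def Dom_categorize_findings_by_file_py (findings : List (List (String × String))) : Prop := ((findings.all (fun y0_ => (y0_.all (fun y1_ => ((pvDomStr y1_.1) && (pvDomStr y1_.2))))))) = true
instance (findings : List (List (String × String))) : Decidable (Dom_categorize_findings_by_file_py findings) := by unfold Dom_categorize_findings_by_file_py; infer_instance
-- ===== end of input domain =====

-- ===== PORT A =====
-- B groups by collecting distinct file keys first and then filtering per key, instead of A's
-- single accumulation pass into a dict of buckets; same result, alternative decomposition.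
-- finding.get('file', 'unknown') — first-match lookup in the association list
def pvKeyOf (f : List (String × String)) : String := (PySem.Dict.mk f).getD "file" "unknown"

def categorize_findings_by_file_py (findings : List (List (String × String))) : List (String × List (List (String × String))) :=
  (findings.foldl
    (fun by_file finding =>
      let fp := pvKeyOf finding
      let by_file := if by_file.contains fp then by_file
                     else by_file.insert fp ([] : List (List (String × String)))
      by_file.modify fp [] (fun l => l ++ [finding]))
    PySem.Dict.empty).items

-- ===== PORT B =====
def categorize_findings_by_file_py_alt (findings : List (List (String × String))) : List (String × List (List (String × String))) :=
  let order := findings.foldl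
    (fun ks finding =>
      let k := pvKeyOf finding
      if ks.contains k then ks else ks ++ [k]) ([] : List String)
  order.map (fun k => (k, findings.filter (fun f => pvKeyOf f == k)))

-- ===== PRECONDITION & SPEC =====
def Spec_categorize_findings_by_file_py (findings : List (List (String × String))) (out : List (String × List (List (String × String)))) : Prop := out = categorize_findings_by_file_py_alt findings
instance (findings : List (List (String × String))) (out : List (String × List (List (String × String)))) : Decidable (Spec_categorize_findings_by_file_py findings out) := by unfold Spec_categorize_findings_by_file_py; infer_instance

-- ===== CLAIM (what is proved, stated in full; the proofs are below) =====
def Claim_equal_categorize_findings_by_file_py : Prop := ∀ (findings : List (List (String × String))), Dom_categorize_findings_by_file_py findings → Spec_categorize_findings_by_file_py findings (categorize_findings_by_file_py findings)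

-- ===== LEMMAS AND PROOFS =====

-- A's loop body (create-bucket-if-absent, then append) is one dict `modify` per finding.
theorem stepA_eq_modify (d : PySem.Dict String (List (List (String × String)))) (f : List (String × String)) :
    (if d.contains (pvKeyOf f) then d else d.insert (pvKeyOf f) []).modify (pvKeyOf f) [] (fun l => l ++ [f])
      = d.modify (pvKeyOf f) [] (fun l => l ++ [f]) := by
  by_cases h : d.contains (pvKeyOf f) = true
  · rw [if_pos h]
  · have h' : d.contains (pvKeyOf f) = false := by simpa using h
    rw [if_neg (by simp [h'])]
    show (d.insert (pvKeyOf f) []).insert (pvKeyOf f) (((d.insert (pvKeyOf f) []).getD (pvKeyOf f) []) ++ [f])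
        = d.insert (pvKeyOf f) ((d.getD (pvKeyOf f) []) ++ [f])
    rw [PySem.Dict.getD_insert_self, PySem.Dict.insert_insert_self, PySem.Dict.getD_of_not_contains _ _ h']

-- A's whole fold, rewritten to the pure-modify shape.
theorem foldA_eq (findings : List (List (String × String))) :
    (findings.foldl
      (fun by_file finding =>
        let fp := pvKeyOf finding
        let by_file := if by_file.contains fp then by_file
                       else by_file.insert fp ([] : List (List (String × String)))
        by_file.modify fp [] (fun l => l ++ [finding]))
      PySem.Dict.empty)
    = findings.foldl (fun d f => d.modify (pvKeyOf f) [] (fun l => l ++ [f])) PySem.Dict.empty := by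
  apply PySem.List.foldl_congr_mem
  intro d f _
  exact stepA_eq_modify d f

-- B's first loop is the ordered dedup of the keys.
theorem orderB_eq (findings : List (List (String × String))) :
    findings.foldl
      (fun ks finding =>
        let k := pvKeyOf finding
        if ks.contains k then ks else ks ++ [k]) ([] : List String)
    = PySem.Set.ofList (findings.map pvKeyOf) := by
  rw [PySem.Set.ofList_eq_foldl, List.foldl_map]
  rfl

-- Every bucket of A's dict is the filter of the findings by that key.
theorem getD_foldA (findings : List (List (String × String))) (c : String) :
    (findings.foldl (fun d f => d.modify (pvKeyOf f) [] (fun l => l ++ [f])) PySem.Dict.empty).getD c []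
      = findings.filter (fun f => pvKeyOf f == c) := by
  have h := PySem.Dict.getD_foldl_modify_append
      (findings.map (fun f => (pvKeyOf f, f))) PySem.Dict.empty c
  rw [List.foldl_map] at h
  simpa [List.filter_map, Function.comp_def, List.map_map] using h

-- ===== VERDICT (by name: the statement is the Claim_ definition above) =====
theorem categorize_findings_by_file_py_spec : Claim_equal_categorize_findings_by_file_py := by
  intro findings _
  show categorize_findings_by_file_py findings = categorize_findings_by_file_py_alt findings
  unfold categorize_findings_by_file_py categorize_findings_by_file_py_alt
  rw [foldA_eq, orderB_eq]
  have hnd : (findings.foldl (fun d f => d.modify (pvKeyOf f) [] (fun l => l ++ [f])) PySem.Dict.empty).keys.Nodup :=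
    PySem.Dict.nodup_keys_foldl_modify_key findings pvKeyOf [] (fun _ f l => l ++ [f]) PySem.Dict.empty (by simp [PySem.Dict.keys_empty])
  rw [PySem.Dict.items_eq_map_keys _ hnd ([] : List (List (String × String)))]
  rw [PySem.Dict.keys_foldl_modify_key findings pvKeyOf [] (fun _ f l => l ++ [f]) PySem.Dict.empty]
  rw [PySem.Dict.keys_empty]
  show (PySem.Set.update ([] : List String) (findings.map pvKeyOf)).map _ = (PySem.Set.ofList (findings.map pvKeyOf)).map _
  apply List.map_congr_left
  intro k _
  rw [getD_foldA]
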